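-- pv_equiv track=rewrite | github.com/Mesolongo/bioinformatics-python-learning | week3/day1: functions basics/day1_functions_basics.py | protein_analysis
-- ===== SOURCE A (Python) =====
-- def protein_analysis(protein_sequence):
--     """
--     Analyze amino acid sequence and return statistics.
--
--     Parameters:
--         protein_sequence (str): Amino acid sequence to analyze
--
--     Returns:
--         dict: Dictionary containing:
--             - 'length': Number of amino acids
--             - 'molecular_weight': Approximate weight in Daltons (110 Da per AA)
--             - 'charged_count': Count of charged amino acids (D, E, K, R, H)
--             - 'hydrophobic_count': Count of hydrophobic amino acids (A, V, L, I, M, F, W, P)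
--
--     Example:
--         >>> protein_analysis("ACDEFGH")
--         {'length': 7, 'molecular_weight': 770, 'charged_count': 3, 'hydrophobic_count': 2}
--     """
--
--     charged = 'DEKRH'
--     hydrophobic = 'AVLIMFWP'
--     length_of_aa = len(protein_sequence)
--     molecular_weight = length_of_aa * 110
--
--     charged_count = sum(protein_sequence.count(aa) for aa in charged)
--     hydrophobic_count = sum(protein_sequence.count(aa) for aa in hydrophobic)
--
--     result = {
--         'length': length_of_aa,
--         'molecular_weight' : molecular_weight,
--         'charged_count' : charged_count,
--         'hydrophobic_count' : hydrophobic_count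
--     }
--
--     return result
-- ===== SOURCE B (Python) =====
-- def protein_analysis(protein_sequence):
--     charged = {'D', 'E', 'K', 'R', 'H'}
--     hydrophobic = {'A', 'V', 'L', 'I', 'M', 'F', 'W', 'P'}
--     charged_count = 0
--     hydrophobic_count = 0
--     for aa in protein_sequence:
--         if aa in charged:
--             charged_count += 1
--         elif aa in hydrophobic:
--             hydrophobic_count += 1
--     length = len(protein_sequence)
--     return {
--         'length': length,
--         'molecular_weight': length * 110,
--         'charged_count': charged_count,
--         'hydrophobic_count': hydrophobic_count,
--     }
-- ===== Notes on version B (the rewrite author's own statement) =====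
-- stated objective: idiomatic
-- what changed: B makes a single pass over the sequence with two set-membership counters instead of calling str.count once per alphabet letter (13 scans of the string).
import Mathlib
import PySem

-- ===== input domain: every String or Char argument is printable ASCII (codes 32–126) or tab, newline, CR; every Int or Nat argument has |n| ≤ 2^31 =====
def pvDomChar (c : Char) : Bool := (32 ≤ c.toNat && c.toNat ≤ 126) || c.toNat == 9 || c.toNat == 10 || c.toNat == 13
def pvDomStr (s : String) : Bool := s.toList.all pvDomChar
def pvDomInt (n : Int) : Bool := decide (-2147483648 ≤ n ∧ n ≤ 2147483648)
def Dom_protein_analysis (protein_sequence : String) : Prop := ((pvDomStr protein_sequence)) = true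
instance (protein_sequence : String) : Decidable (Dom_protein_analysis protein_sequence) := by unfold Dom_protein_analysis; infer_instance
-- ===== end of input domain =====

-- B replaces A's 13 whole-string .count scans by one pass with two set-membership counters; same return value.

-- ===== PORT A =====
def protein_analysis (protein_sequence : String) : List (String × Int) :=
  let charged := "DEKRH"
  let hydrophobic := "AVLIMFWP"
  let length_of_aa : Int := PySem.Str.len protein_sequence
  let molecular_weight : Int := length_of_aa * 110
  let charged_count : Int :=
    (charged.toList.map (fun aa => (PySem.Str.count protein_sequence (String.ofList [aa]) : Int))).sum
  let hydrophobic_count : Int :=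
    (hydrophobic.toList.map (fun aa => (PySem.Str.count protein_sequence (String.ofList [aa]) : Int))).sum
  [("length", length_of_aa), ("molecular_weight", molecular_weight),
   ("charged_count", charged_count), ("hydrophobic_count", hydrophobic_count)]

-- ===== PORT B =====
-- the two Python sets, as lists of their distinct elements (PySem set convention)
def pvCharged : List Char := ['D', 'E', 'K', 'R', 'H']
def pvHydrophobic : List Char := ['A', 'V', 'L', 'I', 'M', 'F', 'W', 'P']

def protein_analysis_alt (protein_sequence : String) : List (String × Int) :=
  let counts : Int × Int := protein_sequence.toList.foldl
    (fun (p : Int × Int) aa =>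
      if pvCharged.contains aa then (p.1 + 1, p.2)
      else if pvHydrophobic.contains aa then (p.1, p.2 + 1)
      else p) (0, 0)
  let length : Int := PySem.Str.len protein_sequence
  [("length", length), ("molecular_weight", length * 110),
   ("charged_count", counts.1), ("hydrophobic_count", counts.2)]

-- ===== PRECONDITION & SPEC =====
def Spec_protein_analysis (protein_sequence : String) (out : List (String × Int)) : Prop := out = protein_analysis_alt protein_sequence
instance (protein_sequence : String) (out : List (String × Int)) : Decidable (Spec_protein_analysis protein_sequence out) := by unfold Spec_protein_analysis; infer_instance

-- ===== CLAIM (what is proved, stated in full; the proofs are below) =====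
def Claim_equal_protein_analysis : Prop := ∀ (protein_sequence : String), Dom_protein_analysis protein_sequence → Spec_protein_analysis protein_sequence (protein_analysis protein_sequence)

-- ===== LEMMAS AND PROOFS =====

-- Chars.count with a single-character needle is plain List.count
theorem count_go_singleton (c : Char) (s : List Char) (fuel acc : Nat)
    (h : s.length ≤ fuel) :
    PySem.Chars.count.go [c] fuel s acc = acc + s.count c := by
  induction s generalizing fuel acc with
  | nil => cases fuel <;> simp [PySem.Chars.count.go]
  | cons x t ih =>
    cases fuel with
    | zero => simp at h
    | succ f =>
      simp only [List.length_cons, Nat.succ_le_succ_iff] at h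
      have step : ∀ a : Nat, PySem.Chars.count.go [c] f t a = a + t.count c := by
        intro a
        cases f with
        | zero =>
          cases t with
          | nil => simp [PySem.Chars.count.go]
          | cons y u => simp at h
        | succ g => exact ih (g + 1) a h
      by_cases hx : c = x
      · subst hx
        simp [PySem.Chars.count.go, List.isPrefixOf, step]
        omega
      · have hbeq : (c == x) = false := by simp [hx]
        have hbeq2 : (x == c) = false := by simp [Ne.symm hx]
        simp [PySem.Chars.count.go, List.isPrefixOf, hbeq, step, List.count_cons, hbeq2]

theorem count_singleton (s : List Char) (c : Char) :
    PySem.Chars.count s [c] = s.count c := by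
  have := count_go_singleton c s s.length 0 (le_refl _)
  simpa [PySem.Chars.count] using this

-- splitting countP over a fresh head letter
theorem countP_cons_letter (a : Char) (L : List Char) (ha : a ∉ L) (s : List Char) :
    s.countP (fun c => decide (c ∈ (a :: L))) = s.count a + s.countP (fun c => decide (c ∈ L)) := by
  induction s with
  | nil => simp
  | cons x t ih =>
    simp only [List.countP_cons, List.count_cons, ih]
    by_cases hx : x = a
    · subst hx
      simp [ha]
      omega
    · have h1 : (x == a) = false := by simp [hx]
      by_cases hm : x ∈ L <;> simp [hx, hm, h1] <;> omega

-- sum of per-letter counts over a duplicate-free alphabet = one countP pass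
theorem sum_counts (L : List Char) (hL : L.Nodup) (s : List Char) :
    (L.map (fun aa => (s.count aa : Int))).sum = (s.countP (fun c => decide (c ∈ L)) : Int) := by
  induction L with
  | nil => simp
  | cons a L ih =>
    have ha : a ∉ L := (List.nodup_cons.mp hL).1
    rw [List.map_cons, List.sum_cons, ih (List.nodup_cons.mp hL).2, countP_cons_letter a L ha s]
    push_cast
    ring

-- membership in the two alphabets is mutually exclusive
theorem charged_not_hydro (c : Char) (h : pvCharged.contains c = true) :
    pvHydrophobic.contains c = false := by
  simp [pvCharged] at h
  rcases h with rfl | rfl | rfl | rfl | rfl <;> decide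

-- the single-pass fold computes the two countP values
theorem fold_counts (s : List Char) (p : Int × Int) :
    s.foldl (fun (p : Int × Int) aa =>
      if pvCharged.contains aa then (p.1 + 1, p.2)
      else if pvHydrophobic.contains aa then (p.1, p.2 + 1)
      else p) p
    = (p.1 + (s.countP (fun c => decide (c ∈ pvCharged)) : Int),
       p.2 + (s.countP (fun c => decide (c ∈ pvHydrophobic)) : Int)) := by
  induction s generalizing p with
  | nil => simp
  | cons x t ih =>
    rw [List.foldl_cons, ih, List.countP_cons, List.countP_cons]
    by_cases hc : pvCharged.contains x = true
    · have hh := charged_not_hydro x hc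
      have hc' : x ∈ pvCharged := by simpa using hc
      have hh' : x ∉ pvHydrophobic := by simpa using hh
      simp [hc', hh']
      ring
    · have hc' : x ∉ pvCharged := by simpa using hc
      by_cases hm : pvHydrophobic.contains x = true
      · have hm' : x ∈ pvHydrophobic := by simpa using hm
        simp [hc', hm']
        ring
      · have hm' : x ∉ pvHydrophobic := by simpa using hm
        simp [hc', hm']

-- a single-letter needle in Str.count, bridged to List.count
theorem chars_count_ofList (s : List Char) (aa : Char) :
    PySem.Chars.count s (String.ofList [aa]).toList = s.count aa := by
  rw [String.toList_ofList, count_singleton]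

-- ===== VERDICT (by name: the statement is the Claim_ definition above) =====
theorem protein_analysis_spec : Claim_equal_protein_analysis := by
  intro s _
  unfold Spec_protein_analysis protein_analysis protein_analysis_alt
  simp only [fold_counts, PySem.Str.count_eq, chars_count_ofList]
  rw [show "DEKRH".toList = pvCharged from by decide,
      show "AVLIMFWP".toList = pvHydrophobic from by decide,
      sum_counts pvCharged (by decide), sum_counts pvHydrophobic (by decide)]
  simp
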